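-- pv_equiv track=rewrite | github.com/gardenee/BaekJoon_Python | BJ08958.py | check
-- ===== SOURCE A (Python) =====
-- def check(L):
--     ans = 0
--     for i in range(len(L)):
--         temp = 0
--         for n in range(i,-1,-1):
--             if L[n] == 'O':
--                 temp += 1
--             else:
--                 break
--         ans += temp
--     return ans
-- ===== SOURCE B (Python) =====
-- def check(L):
--     ans = 0
--     streak = 0
--     for c in L:
--         if c == 'O':
--             streak += 1
--             ans += streak
--         else:
--             streak = 0
--     return ans
-- ===== Notes on version B (the rewrite author's own statement) =====
-- stated objective: faster
-- what changed: Replaced the per-index backward rescan with a single forward pass keeping a running streak counter that is reset whenever the streak character is broken.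
import Mathlib
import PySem

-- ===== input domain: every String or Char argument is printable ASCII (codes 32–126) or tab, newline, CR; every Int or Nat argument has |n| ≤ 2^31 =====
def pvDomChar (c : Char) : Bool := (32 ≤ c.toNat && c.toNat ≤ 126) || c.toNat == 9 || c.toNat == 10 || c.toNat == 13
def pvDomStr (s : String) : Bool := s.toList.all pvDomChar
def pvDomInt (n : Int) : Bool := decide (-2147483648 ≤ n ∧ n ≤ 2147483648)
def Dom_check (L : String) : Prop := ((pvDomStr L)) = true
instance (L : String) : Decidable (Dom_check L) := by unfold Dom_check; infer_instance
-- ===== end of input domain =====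

-- B replaces A's per-index backward rescan by one forward pass with a running streak counter (objective: faster).


-- ===== PORT A =====
-- inner loop of A: for n in range(i,-1,-1): count consecutive 'O' going down, break otherwise
def checkInner (cs : List Char) : Nat → Int
  | 0 => if cs.getD 0 ' ' == 'O' then 1 else 0
  | i + 1 => if cs.getD (i + 1) ' ' == 'O' then 1 + checkInner cs i else 0

def check (L : String) : Int :=
  (List.range L.toList.length).foldl (fun ans i => ans + checkInner L.toList i) 0

-- ===== PORT B =====
def checkStep (p : Int × Int) (c : Char) : Int × Int :=
  if c == 'O' then (p.1 + (p.2 + 1), p.2 + 1) else (p.1, 0)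

def check_alt (L : String) : Int :=
  (L.toList.foldl checkStep (0, 0)).1

-- ===== PRECONDITION & SPEC =====
def Spec_check (L : String) (out : Int) : Prop := out = check_alt L
instance (L : String) (out : Int) : Decidable (Spec_check L out) := by unfold Spec_check; infer_instance

-- ===== CLAIM (what is proved, stated in full; the proofs are below) =====
def Claim_equal_check : Prop := ∀ (L : String), Dom_check L → Spec_check L (check L)

-- ===== LEMMAS AND PROOFS =====

-- streak length ending at the last character
def streakEnd (cs : List Char) : Int :=
  match cs.length with
  | 0 => 0
  | n + 1 => checkInner cs n

def checkList (cs : List Char) : Int :=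
  (List.range cs.length).foldl (fun ans i => ans + checkInner cs i) 0

lemma checkInner_append (cs : List Char) (c : Char) (i : Nat) (h : i < cs.length) :
    checkInner (cs ++ [c]) i = checkInner cs i := by
  induction i with
  | zero =>
    simp only [checkInner, List.getD, List.getElem?_append_left h]
    rfl
  | succ i ih =>
    have hi : i < cs.length := Nat.lt_of_succ_lt h
    simp only [checkInner, List.getD, List.getElem?_append_left h, ih hi]
    rfl

lemma checkInner_last (cs : List Char) (c : Char) :
    checkInner (cs ++ [c]) cs.length =
      if c == 'O' then streakEnd cs + 1 else 0 := by
  have hget : (cs ++ [c])[cs.length]?.getD ' ' = c := by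
    simp
  cases hcs : cs.length with
  | zero =>
    have : cs = [] := List.eq_nil_of_length_eq_zero hcs
    subst this
    simp [checkInner, streakEnd]
  | succ n =>
    have hn : n < cs.length := by omega
    have hg : (cs ++ [c])[n + 1]?.getD ' ' = c := by rw [← hcs]; exact hget
    simp only [checkInner, List.getD, hg, checkInner_append cs c n hn]
    by_cases hc : c = 'O'
    · simp [hc, streakEnd, hcs]; ring
    · simp [hc]

lemma streakEnd_append (cs : List Char) (c : Char) :
    streakEnd (cs ++ [c]) = if c == 'O' then streakEnd cs + 1 else 0 := by
  have h : (cs ++ [c]).length = cs.length + 1 := by simp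
  simp only [streakEnd, h]
  exact checkInner_last cs c

lemma checkList_append (cs : List Char) (c : Char) :
    checkList (cs ++ [c]) = checkList cs + (if c == 'O' then streakEnd cs + 1 else 0) := by
  simp only [checkList, List.length_append, List.length_singleton, List.range_succ,
    List.foldl_append, List.foldl_cons, List.foldl_nil]
  rw [checkInner_last cs c]
  congr 1
  apply PySem.List.foldl_congr_mem
  intro a i hi
  rw [checkInner_append cs c i (List.mem_range.mp hi)]

lemma fold_inv (cs : List Char) :
    cs.foldl checkStep (0, 0) = (checkList cs, streakEnd cs) := by
  induction cs using List.reverseRecOn with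
  | nil => simp [checkList, streakEnd]
  | append_singleton cs c ih =>
    rw [List.foldl_append, ih, List.foldl_cons, List.foldl_nil]
    rw [checkList_append, streakEnd_append]
    simp only [checkStep]
    split <;> simp

-- ===== VERDICT (by name: the statement is the Claim_ definition above) =====
theorem check_spec : Claim_equal_check := by
  intro L _
  show check L = check_alt L
  rw [check_alt, fold_inv]
  rfl
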